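-- pv_equiv track=rewrite | github.com/mimang95/school_bauer_python | python_code/code_arbeitsblaetter/passwort_generator_alternative.py | create_new_password
-- ===== SOURCE A (Python) =====
-- def create_new_password(sentence):
--     word = ""
--     for i in range(len(sentence)):
--         if i == 0:
--             word += sentence[i]
--         if sentence[i] == " ":
--             word += sentence[i + 1]
--         word.lower()
--
--     password = ""
--     for i in range(len(word)):
--         if i % 2 == 0:
--             password += word[i].upper()
--         else:
--             password += word[i].lower()
--     return password
-- ===== SOURCE B (Python) =====
-- def create_new_password(sentence):
--     # single pass: build the password directly, no intermediate word;
--     # casing parity driven by the running length of the output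
--     password = ""
--     for i in range(len(sentence)):
--         if i == 0:
--             c = sentence[i]
--             password += c.upper() if len(password) % 2 == 0 else c.lower()
--         if sentence[i] == " ":
--             c = sentence[i + 1]
--             password += c.upper() if len(password) % 2 == 0 else c.lower()
--     return password
-- ===== Notes on version B (the rewrite author's own statement) =====
-- stated objective: simpler
-- what changed: Fused A's two passes (build intermediate word, then re-case it by index) into one loop that appends each selected character directly, choosing upper/lower from the running output length, eliminating the intermediate word string.
import Mathlib
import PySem

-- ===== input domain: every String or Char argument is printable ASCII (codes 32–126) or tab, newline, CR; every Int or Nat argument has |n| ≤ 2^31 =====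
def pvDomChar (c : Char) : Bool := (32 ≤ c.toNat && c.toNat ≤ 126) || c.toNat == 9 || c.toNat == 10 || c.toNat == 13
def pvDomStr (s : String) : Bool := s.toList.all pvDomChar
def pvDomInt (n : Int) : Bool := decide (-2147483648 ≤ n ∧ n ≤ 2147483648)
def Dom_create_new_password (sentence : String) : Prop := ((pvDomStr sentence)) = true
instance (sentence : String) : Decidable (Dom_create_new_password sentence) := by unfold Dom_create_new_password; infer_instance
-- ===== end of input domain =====

-- B fuses A's two passes into one loop appending directly, casing by the running output length (objective: simpler).

-- cased copy of a char: upper on even position counter, lower on odd (shared helper of both ports)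
def pvCase (k : Nat) (c : Char) : Char :=
  if k % 2 = 0 then PySem.Chars.upperChar c else PySem.Chars.lowerChar c

-- ===== PORT A =====
-- one iteration of A's first loop (indices are in range under Pre_, so getD defaults are never used)
def pvWordStep (s : List Char) (w : List Char) (i : Nat) : List Char :=
  let w' := if i = 0 then w ++ [s.getD i ' '] else w
  if s.getD i ' ' = ' ' then w' ++ [s.getD (i + 1) ' '] else w'

def create_new_password (sentence : String) : String :=
  let s := sentence.toList
  let word := (List.range s.length).foldl (pvWordStep s) []
  let password := (List.range word.length).foldl
    (fun p i => if i % 2 = 0 then p ++ [PySem.Chars.upperChar (word.getD i ' ')]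
                else p ++ [PySem.Chars.lowerChar (word.getD i ' ')]) []
  String.mk password

-- ===== PORT B =====
-- one iteration of B's single loop: append selected chars, cased by the running output length
def pvBStep (s : List Char) (p : List Char) (i : Nat) : List Char :=
  let p' := if i = 0 then p ++ [pvCase p.length (s.getD i ' ')] else p
  if s.getD i ' ' = ' ' then p' ++ [pvCase p'.length (s.getD (i + 1) ' ')] else p'

def create_new_password_alt (sentence : String) : String :=
  String.mk ((List.range sentence.toList.length).foldl (pvBStep sentence.toList) [])

-- ===== PRECONDITION & SPEC =====
-- Pre_ excludes exactly the sentences ending in a space: there Python A (and B alike)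
-- raises IndexError on sentence[i + 1].
def Pre_create_new_password (sentence : String) : Prop :=
  sentence.toList.getLast? ≠ some ' '
instance (sentence : String) : Decidable (Pre_create_new_password sentence) := by
  unfold Pre_create_new_password; infer_instance

def pvWitness_create_new_password : String := "hello brave new world"

def Spec_create_new_password (sentence : String) (out : String) : Prop := out = create_new_password_alt sentence
instance (sentence : String) (out : String) : Decidable (Spec_create_new_password sentence out) := by unfold Spec_create_new_password; infer_instance

-- ===== CLAIM (what is proved, stated in full; the proofs are below) =====
def Claim_equal_create_new_password : Prop := ∀ (sentence : String), Dom_create_new_password sentence → Pre_create_new_password sentence → Spec_create_new_password sentence (create_new_password sentence)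

-- ===== LEMMAS AND PROOFS =====

-- the alternately-cased copy of w, position counter starting at k
def pvAltCase : List Char → Nat → List Char
  | [], _ => []
  | c :: cs, k => pvCase k c :: pvAltCase cs (k + 1)

theorem pvAltCase_length (w : List Char) (k : Nat) : (pvAltCase w k).length = w.length := by
  induction w generalizing k with
  | nil => rfl
  | cons c cs ih => simp [pvAltCase, ih]

theorem pvAltCase_snoc (w : List Char) (c : Char) (k : Nat) :
    pvAltCase (w ++ [c]) k = pvAltCase w k ++ [pvCase (k + w.length) c] := by
  induction w generalizing k with
  | nil => simp [pvAltCase]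
  | cons d ds ih =>
      simp only [List.cons_append, pvAltCase, ih, List.length_cons]
      have h : k + 1 + ds.length = k + (ds.length + 1) := by omega
      rw [h]

theorem pvAltCase_snoc2 (w : List Char) (x y : Char) :
    pvAltCase (w ++ [x, y]) 0 = pvAltCase w 0 ++ [pvCase w.length x, pvCase (w.length + 1) y] := by
  rw [show w ++ [x, y] = (w ++ [x]) ++ [y] from by simp, pvAltCase_snoc, pvAltCase_snoc]
  simp

-- A's second loop, over any index window [a, a+b) with a + b = w.length, cases w positionally
theorem pvCaseLoop (w : List Char) (b : Nat) : ∀ (a : Nat) (p : List Char), a + b = w.length →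
    (List.range' a b).foldl
      (fun p i => if i % 2 = 0 then p ++ [PySem.Chars.upperChar (w.getD i ' ')]
                  else p ++ [PySem.Chars.lowerChar (w.getD i ' ')]) p
      = p ++ pvAltCase (w.drop a) a := by
  induction b with
  | zero =>
      intro a p h
      have hle : w.length ≤ a := by omega
      simp [List.drop_eq_nil_of_le hle, pvAltCase]
  | succ b ih =>
      intro a p h
      have ha : a < w.length := by omega
      have hdrop : w.drop a = w.getD a ' ' :: w.drop (a + 1) := by
        rw [List.getD_eq_getElem w ' ' ha]
        exact (List.drop_eq_getElem_cons ha)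
      rw [List.range'_succ, List.foldl_cons, ih (a + 1) _ (by omega), hdrop]
      simp [pvAltCase, pvCase]
      split_ifs <;> simp

-- one step of B on an alternately-cased state mirrors one step of A's word loop
theorem pvBStep_eq (s w : List Char) (i : Nat) :
    pvBStep s (pvAltCase w 0) i = pvAltCase (pvWordStep s w i) 0 := by
  unfold pvBStep pvWordStep
  generalize s.getD i ' ' = a
  generalize s.getD (i + 1) ' ' = b
  by_cases h0 : i = 0 <;> by_cases hsp : a = ' ' <;>
    simp [h0, hsp, pvAltCase_snoc, pvAltCase_snoc2, pvAltCase_length]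

theorem pvFoldB (s : List Char) (idxs : List Nat) : ∀ (w : List Char),
    idxs.foldl (pvBStep s) (pvAltCase w 0) = pvAltCase (idxs.foldl (pvWordStep s) w) 0 := by
  induction idxs with
  | nil => intro w; rfl
  | cons i rest ih =>
      intro w
      simp only [List.foldl_cons, pvBStep_eq]
      exact ih _

theorem pv_main (sentence : String) :
    create_new_password sentence = create_new_password_alt sentence := by
  simp only [create_new_password, create_new_password_alt]
  have hB := pvFoldB sentence.toList (List.range sentence.toList.length) []
  simp only [show pvAltCase [] 0 = ([] : List Char) from rfl] at hB
  rw [hB]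
  have hA := pvCaseLoop ((List.range sentence.toList.length).foldl (pvWordStep sentence.toList) [])
      ((List.range sentence.toList.length).foldl (pvWordStep sentence.toList) []).length 0 []
      (by omega)
  simp only [List.range_eq_range'] at hA ⊢
  rw [hA]
  simp

-- ===== VERDICT (by name: the statement is the Claim_ definition above) =====
theorem create_new_password_spec : Claim_equal_create_new_password := by
  intro sentence _ _
  unfold Spec_create_new_password
  exact pv_main sentence
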